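-- pv_equiv track=rewrite | github.com/wurlinney/AISD | sem2/lab1/task22/task22.py | build_compatibility_matrix
-- ===== SOURCE A (Python) =====
-- def is_compatible(a, b):
--     for i in range(len(a) - 1):
--         if a[i] == b[i] == a[i + 1] == b[i + 1]:
--             return False
--     return True
--
-- def build_compatibility_matrix(patterns):
--     size = len(patterns)
--     matrix = [[False] * size for _ in range(size)]
--     for i in range(size):
--         for j in range(i, size):
--             compatible = is_compatible(patterns[i], patterns[j])
--             matrix[i][j] = matrix[j][i] = compatible
--     return matrix
-- ===== SOURCE B (Python) =====
-- def build_compatibility_matrix(patterns):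
--     runs = [{(i, p[i]) for i in range(len(p) - 1) if p[i] == p[i + 1]}
--             for p in patterns]
--     return [[r.isdisjoint(s) for s in runs] for r in runs]
-- ===== Notes on version B (the rewrite author's own statement) =====
-- stated objective: faster
-- what changed: B precomputes one run-set {(i, p[i]) : p[i]==p[i+1]} per pattern and fills the matrix with pairwise set-disjointness tests, replacing A's per-pair character rescans and in-place symmetric assignment.
import Mathlib
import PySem

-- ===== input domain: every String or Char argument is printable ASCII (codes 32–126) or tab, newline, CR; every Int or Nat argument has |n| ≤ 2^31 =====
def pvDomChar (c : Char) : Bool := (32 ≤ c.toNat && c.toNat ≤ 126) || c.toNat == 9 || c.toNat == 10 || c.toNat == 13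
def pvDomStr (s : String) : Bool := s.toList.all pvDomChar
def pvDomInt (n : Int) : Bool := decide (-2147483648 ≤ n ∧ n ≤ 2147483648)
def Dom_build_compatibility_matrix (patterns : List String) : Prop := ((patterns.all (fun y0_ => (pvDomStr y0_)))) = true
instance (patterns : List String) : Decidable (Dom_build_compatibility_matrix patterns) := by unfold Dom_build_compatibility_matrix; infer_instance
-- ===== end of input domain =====

-- B replaces A's per-pair rescans by a one-time per-pattern "run set" index plus pairwise
-- set-disjointness tests (objective: faster index-based decomposition); equivalence is on
-- inputs where A raises no IndexError (excluded by Pre_ below).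

-- ===== PORT A =====
-- port of is_compatible; the getD default ' ' is only reached at indices where the Python
-- would raise IndexError, which Pre_ excludes
def is_compatible (a b : String) : Bool :=
  !((List.range (a.toList.length - 1)).any (fun i =>
      a.toList.getD i ' ' == b.toList.getD i ' ' &&
      b.toList.getD i ' ' == a.toList.getD (i+1) ' ' &&
      a.toList.getD (i+1) ' ' == b.toList.getD (i+1) ' '))

def build_compatibility_matrix (patterns : List String) : List (List Bool) :=
  let size := patterns.length
  let matrix := List.replicate size (List.replicate size false)
  (List.range size).foldl (fun matrix i =>
    -- range(i, size) over Nat indices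
    (List.range' i (size - i)).foldl (fun matrix j =>
      let compatible := is_compatible (patterns.getD i "") (patterns.getD j "")
      let matrix := matrix.set i ((matrix.getD i []).set j compatible)
      matrix.set j ((matrix.getD j []).set i compatible)) matrix) matrix

-- ===== PORT B =====
-- {(i, p[i]) for i in range(len(p)-1) if p[i] == p[i+1]}
def runs_of (p : String) : PySem.Set (Nat × Char) :=
  PySem.Set.ofList (((List.range (p.toList.length - 1)).filter
      (fun i => p.toList.getD i ' ' == p.toList.getD (i+1) ' ')).map
      (fun i => (i, p.toList.getD i ' ')))

def build_compatibility_matrix_alt (patterns : List String) : List (List Bool) :=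
  let runs := patterns.map runs_of
  runs.map (fun r => runs.map (fun s => PySem.Set.isdisjoint r s))

-- ===== PRECONDITION & SPEC =====
-- a and b share a "run" at some position (the condition under which is_compatible finds False)
def sharedRunPre (a b : List Char) : Prop :=
  ∃ i < a.length, i + 1 < a.length ∧ i + 1 < b.length ∧
    a.getD i ' ' = a.getD (i+1) ' ' ∧ b.getD i ' ' = b.getD (i+1) ' ' ∧
    a.getD i ' ' = b.getD i ' '

-- exactly the (a, b) pairs on which Python's is_compatible(a, b) raises IndexError:
-- b is shorter, no shared run stops the scan early, and the scan reaches an index of b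
-- that does not exist
def raisesPre (a b : List Char) : Prop :=
  2 ≤ a.length ∧ b.length < a.length ∧ ¬ sharedRunPre a b ∧
  (b.length + 2 ≤ a.length ∨
    (b.length + 1 = a.length ∧
      a.getD (a.length - 2) ' ' = b.getD (a.length - 2) ' ' ∧
      b.getD (a.length - 2) ' ' = a.getD (a.length - 1) ' '))

-- Pre_ excludes exactly the inputs on which A raises IndexError (is_compatible reads past
-- the end of a shorter second pattern); A returns on every input satisfying Pre_.
def Pre_build_compatibility_matrix (patterns : List String) : Prop :=
  ∀ i < patterns.length, ∀ j < patterns.length, i ≤ j →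
    ¬ raisesPre (patterns.getD i "").toList (patterns.getD j "").toList

instance (patterns : List String) : Decidable (Pre_build_compatibility_matrix patterns) := by
  unfold Pre_build_compatibility_matrix raisesPre sharedRunPre
  haveI : ∀ (a b : List Char), Decidable (2 ≤ a.length ∧ b.length < a.length ∧
      ¬ (∃ i < a.length, i + 1 < a.length ∧ i + 1 < b.length ∧
        a.getD i ' ' = a.getD (i+1) ' ' ∧ b.getD i ' ' = b.getD (i+1) ' ' ∧
        a.getD i ' ' = b.getD i ' ') ∧
      (b.length + 2 ≤ a.length ∨
        (b.length + 1 = a.length ∧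
          a.getD (a.length - 2) ' ' = b.getD (a.length - 2) ' ' ∧
          b.getD (a.length - 2) ' ' = a.getD (a.length - 1) ' '))) :=
    fun a b => inferInstance
  infer_instance

def pvWitness_build_compatibility_matrix : List String := ["ab", "ba", "aab"]

def Spec_build_compatibility_matrix (patterns : List String) (out : List (List Bool)) : Prop := out = build_compatibility_matrix_alt patterns
instance (patterns : List String) (out : List (List Bool)) : Decidable (Spec_build_compatibility_matrix patterns out) := by unfold Spec_build_compatibility_matrix; infer_instance

-- ===== CLAIM (what is proved, stated in full; the proofs are below) =====
def Claim_equal_build_compatibility_matrix : Prop := ∀ (patterns : List String), Dom_build_compatibility_matrix patterns → Pre_build_compatibility_matrix patterns → Spec_build_compatibility_matrix patterns (build_compatibility_matrix patterns)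

-- ===== LEMMAS AND PROOFS =====

-- proof-side helpers: 2D access / write, the flattened write list of A's nested loops
def get2 (m : List (List Bool)) (r c : Nat) : Bool := (m.getD r []).getD c false

def stepW (v : Nat → Nat → Bool) (m : List (List Bool)) (p : Nat × Nat) : List (List Bool) :=
  let m1 := m.set p.1 ((m.getD p.1 []).set p.2 (v p.1 p.2))
  m1.set p.2 ((m1.getD p.2 []).set p.1 (v p.1 p.2))

def vfun (patterns : List String) (i j : Nat) : Bool :=
  is_compatible (patterns.getD i "") (patterns.getD j "")

def pairsUpTo (n : Nat) : List (Nat × Nat) :=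
  (List.range n).flatMap (fun i => (List.range' i (n - i)).map (fun j => (i, j)))

def shape2 (n : Nat) (m : List (List Bool)) : Prop :=
  m.length = n ∧ ∀ row ∈ m, row.length = n

lemma getD_set_list {α : Type} (l : List α) (i j : Nat) (a d : α) :
    (l.set i a).getD j d = if j = i ∧ j < l.length then a else l.getD j d := by
  simp [List.getD_eq_getElem?_getD, List.getElem?_set]
  split_ifs with h1 h2 h3 <;> simp_all <;> omega

lemma foldl_nested_flat {α β : Type} (l : List α) (h : α → List β)
    (g : List (List Bool) → α → β → List (List Bool)) (m0 : List (List Bool)) :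
    l.foldl (fun m i => (h i).foldl (fun m j => g m i j) m) m0
      = (l.flatMap (fun i => (h i).map (fun j => (i, j)))).foldl (fun m p => g m p.1 p.2) m0 := by
  induction l generalizing m0 with
  | nil => rfl
  | cons x xs ih => simp [List.foldl_append, List.foldl_map, ih]

lemma A_eq_flat (patterns : List String) :
    build_compatibility_matrix patterns
      = (pairsUpTo patterns.length).foldl (stepW (vfun patterns))
          (List.replicate patterns.length (List.replicate patterns.length false)) := by
  unfold build_compatibility_matrix pairsUpTo
  rw [foldl_nested_flat]
  rfl

lemma mem_pairsUpTo (n x y : Nat) : (x, y) ∈ pairsUpTo n ↔ x ≤ y ∧ y < n := by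
  unfold pairsUpTo
  simp [List.mem_flatMap, List.mem_range', List.mem_range]
  constructor
  · rintro ⟨h, i, hi, rfl⟩; omega
  · rintro ⟨h1, h2⟩; exact ⟨by omega, y - x, by omega, by omega⟩

lemma shape2_set_row (n : Nat) (m : List (List Bool)) (i j : Nat) (val : Bool)
    (hm : shape2 n m) (hi : i < n) :
    shape2 n (m.set i ((m.getD i []).set j val)) := by
  refine ⟨by simp [hm.1], ?_⟩
  intro row hrw
  rcases List.mem_or_eq_of_mem_set hrw with h | h
  · exact hm.2 row h
  · subst h
    have hml := hm.1
    rw [List.length_set, List.getD_eq_getElem _ _ (by omega : i < m.length)]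
    exact hm.2 _ (List.getElem_mem _)

lemma shape2_stepW (n : Nat) (v : Nat → Nat → Bool) (m : List (List Bool)) (p : Nat × Nat)
    (hm : shape2 n m) (h1 : p.1 < n) (h2 : p.2 < n) : shape2 n (stepW v m p) := by
  exact shape2_set_row n _ p.2 p.1 _ (shape2_set_row n m p.1 p.2 _ hm h1) h2

lemma shape2_foldl (n : Nat) (v : Nat → Nat → Bool) (P : List (Nat × Nat))
    (hP : ∀ p ∈ P, p.1 ≤ p.2 ∧ p.2 < n)
    (m : List (List Bool)) (hm : shape2 n m) : shape2 n (P.foldl (stepW v) m) := by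
  induction P generalizing m with
  | nil => exact hm
  | cons q t ih =>
    have hq := hP q (List.mem_cons_self ..)
    apply ih
    · exact fun p hp => hP p (List.mem_cons_of_mem _ hp)
    · exact shape2_stepW n v m q hm (by omega) hq.2

lemma get2_stepW (n : Nat) (v : Nat → Nat → Bool) (m : List (List Bool)) (p : Nat × Nat)
    (hm : shape2 n m) (h1 : p.1 < n) (h2 : p.2 < n) (r c : Nat) :
    get2 (stepW v m p) r c
      = if (r = p.1 ∧ c = p.2) ∨ (r = p.2 ∧ c = p.1) then v p.1 p.2 else get2 m r c := by
  have hl := hm.1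
  have h1' : p.1 < m.length := by omega
  have h2' : p.2 < m.length := by omega
  have e1 : (m.getD p.1 []).length = n := by
    rw [List.getD_eq_getElem _ _ h1']; exact hm.2 _ (List.getElem_mem _)
  simp only [get2, stepW, getD_set_list, List.length_set]
  have erow : ∀ i, i < m.length → (m[i]?.getD []).length = n := by
    intro i hi; rw [List.getElem?_eq_getElem hi]; exact hm.2 _ (List.getElem_mem _)
  have erow' : ∀ i (h : i < m.length), m[i].length = n := by
    intro i h; exact hm.2 _ (List.getElem_mem _)
  split_ifs <;> simp_all [getD_set_list, List.getElem?_set] <;> rw [if_neg (by omega)]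

lemma get2_foldl_stepW (n : Nat) (v : Nat → Nat → Bool) (P : List (Nat × Nat))
    (hP : ∀ p ∈ P, p.1 ≤ p.2 ∧ p.2 < n) (m : List (List Bool)) (hm : shape2 n m)
    (r c : Nat) (hr : r < n) (hc : c < n) :
    get2 (P.foldl (stepW v) m) r c
      = if (min r c, max r c) ∈ P then v (min r c) (max r c) else get2 m r c := by
  induction P generalizing m with
  | nil => simp
  | cons q t ih =>
    obtain ⟨q1, q2⟩ := q
    have hq := hP (q1, q2) (List.mem_cons_self ..)
    rw [List.foldl_cons,
      ih (fun p hp => hP p (List.mem_cons_of_mem _ hp)) _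
        (shape2_stepW n v m (q1, q2) hm (by omega) hq.2),
      get2_stepW n v m (q1, q2) hm (by omega) hq.2]
    simp only [List.mem_cons]
    by_cases hmem : (min r c, max r c) ∈ t
    · rw [if_pos hmem, if_pos (Or.inr hmem)]
    · by_cases heq : (min r c, max r c) = (q1, q2)
      · have e := heq
        rw [Prod.mk.injEq] at e
        obtain ⟨e1, e2⟩ := e
        rw [if_neg hmem, if_pos (Or.inl heq), if_pos (show (r = q1 ∧ c = q2) ∨ (r = q2 ∧ c = q1) by omega), e1, e2]
      · have e := heq
        rw [Prod.mk.injEq] at e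
        rw [if_neg hmem, if_neg (not_or.mpr ⟨heq, hmem⟩),
          if_neg (show ¬((r = q1 ∧ c = q2) ∨ (r = q2 ∧ c = q1)) by omega)]

lemma A_entry (patterns : List String) (r c : Nat)
    (hr : r < patterns.length) (hc : c < patterns.length) :
    get2 (build_compatibility_matrix patterns) r c = vfun patterns (min r c) (max r c) := by
  rw [A_eq_flat]
  rw [get2_foldl_stepW patterns.length (vfun patterns) _
    (fun p hp => by
      obtain ⟨x, y⟩ := p
      have := (mem_pairsUpTo patterns.length x y).mp hp
      exact ⟨this.1, this.2⟩) _
    ⟨by simp, fun row h => by simp [List.eq_of_mem_replicate h]⟩ r c hr hc]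
  rw [if_pos ((mem_pairsUpTo ..).mpr ⟨by omega, by omega⟩)]

lemma A_shape (patterns : List String) :
    shape2 patterns.length (build_compatibility_matrix patterns) := by
  rw [A_eq_flat]
  exact shape2_foldl _ _ _
    (fun p hp => by
      obtain ⟨x, y⟩ := p
      have := (mem_pairsUpTo patterns.length x y).mp hp
      exact ⟨this.1, this.2⟩) _
    ⟨by simp, fun row h => by simp [List.eq_of_mem_replicate h]⟩

lemma mem_runs_of (p : String) (i : Nat) (ch : Char) :
    (i, ch) ∈ runs_of p ↔
      i + 1 < p.toList.length ∧ p.toList.getD i ' ' = p.toList.getD (i+1) ' ' ∧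
        ch = p.toList.getD i ' ' := by
  unfold runs_of
  rw [PySem.Set.mem_ofList]
  simp only [List.mem_map, List.mem_filter, List.mem_range, beq_iff_eq, Prod.mk.injEq]
  constructor
  · rintro ⟨i', ⟨hi', he⟩, rfl, rfl⟩
    exact ⟨by omega, he, rfl⟩
  · rintro ⟨hi, he, rfl⟩
    exact ⟨i, ⟨by omega, he⟩, rfl, rfl⟩

lemma isdisjoint_iff_not_shared (a b : String) :
    PySem.Set.isdisjoint (runs_of a) (runs_of b) = true ↔ ¬ sharedRunPre a.toList b.toList := by
  rw [PySem.Set.isdisjoint_iff]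
  constructor
  · rintro hall ⟨i, hlt, hia, hib, ha, hb, hab⟩
    exact hall (i, a.toList.getD i ' ') ((mem_runs_of a i _).mpr ⟨hia, ha, rfl⟩)
      ((mem_runs_of b i _).mpr ⟨hib, hb, hab⟩)
  · rintro hns ⟨i, ch⟩ hx hy
    obtain ⟨hia, ha, rfl⟩ := (mem_runs_of a i ch).mp hx
    obtain ⟨hib, hb, hab⟩ := (mem_runs_of b i _).mp hy
    exact hns ⟨i, by omega, hia, hib, ha, hb, hab⟩

lemma is_compatible_iff (a b : String) :
    is_compatible a b = true ↔
      ¬ ∃ i, i + 1 < a.toList.length ∧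
        a.toList.getD i ' ' = b.toList.getD i ' ' ∧
        b.toList.getD i ' ' = a.toList.getD (i+1) ' ' ∧
        a.toList.getD (i+1) ' ' = b.toList.getD (i+1) ' ' := by
  unfold is_compatible
  simp only [Bool.not_eq_true', List.any_eq_false, List.mem_range, Bool.and_eq_true,
    beq_iff_eq, not_exists]
  constructor
  · intro h i hi
    have := h i (by omega)
    tauto
  · intro h i hi
    have h2 := h i
    have h3 : i + 1 < a.toList.length := by omega
    tauto

lemma chain_iff_shared (a b : String) (h : ¬ raisesPre a.toList b.toList) :
    (∃ i, i + 1 < a.toList.length ∧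
        a.toList.getD i ' ' = b.toList.getD i ' ' ∧
        b.toList.getD i ' ' = a.toList.getD (i+1) ' ' ∧
        a.toList.getD (i+1) ' ' = b.toList.getD (i+1) ' ')
      ↔ sharedRunPre a.toList b.toList := by
  constructor
  · rintro ⟨i, hi, c1, c2, c3⟩
    by_cases hib : i + 1 < b.toList.length
    · exact ⟨i, by omega, hi, hib, by rw [c1, c2], by rw [c2, c3], c1⟩
    · unfold raisesPre at h
      push Not at h
      by_cases hsh : sharedRunPre a.toList b.toList
      · exact hsh
      · exfalso
        have hla : 2 ≤ a.toList.length := by omega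
        have hlb : b.toList.length < a.toList.length := by omega
        have := h hla hlb hsh
        obtain ⟨hc1, hc2⟩ := this
        have heq : b.toList.length + 1 = a.toList.length := by omega
        have hi' : i = a.toList.length - 2 := by omega
        have hi2 : i + 1 = a.toList.length - 1 := by omega
        exact (hc2 heq) (by rw [← hi']; exact c1) (by rw [← hi', ← hi2]; exact c2)
  · rintro ⟨i, hlt, hia, hib, ha, hb, hab⟩
    exact ⟨i, hia, hab, by rw [← hab, ha], by rw [← ha, hab, hb]⟩

lemma compat_eq_disjoint (a b : String) (h : ¬ raisesPre a.toList b.toList) :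
    is_compatible a b = PySem.Set.isdisjoint (runs_of a) (runs_of b) := by
  rw [Bool.eq_iff_iff, is_compatible_iff, isdisjoint_iff_not_shared,
    not_iff_not, chain_iff_shared a b h]

lemma isdisjoint_comm {α : Type} [BEq α] [LawfulBEq α] (s t : PySem.Set α) :
    PySem.Set.isdisjoint s t = PySem.Set.isdisjoint t s := by
  rw [Bool.eq_iff_iff, PySem.Set.isdisjoint_iff, PySem.Set.isdisjoint_iff]
  exact ⟨fun h x hxt hxs => h x hxs hxt, fun h x hxs hxt => h x hxt hxs⟩

lemma B_entry (patterns : List String) (r c : Nat)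
    (hr : r < patterns.length) (hc : c < patterns.length) :
    ((build_compatibility_matrix_alt patterns).getD r []).getD c false
      = PySem.Set.isdisjoint (runs_of (patterns.getD r "")) (runs_of (patterns.getD c "")) := by
  simp only [build_compatibility_matrix_alt, List.getD_eq_getElem?_getD, List.getElem?_map,
    List.getElem?_eq_getElem hr, List.getElem?_eq_getElem hc, Option.map_some, Option.getD_some,
    List.getD_eq_getElem?_getD]

lemma B_shape (patterns : List String) :
    shape2 patterns.length (build_compatibility_matrix_alt patterns) := by
  refine ⟨by simp [build_compatibility_matrix_alt], ?_⟩
  intro row h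
  simp only [build_compatibility_matrix_alt, List.mem_map] at h
  obtain ⟨x, _, rfl⟩ := h
  simp

-- ===== VERDICT (by name: the statement is the Claim_ definition above) =====
theorem build_compatibility_matrix_spec : Claim_equal_build_compatibility_matrix := by
  intro patterns _ hpre
  unfold Spec_build_compatibility_matrix
  have hA := A_shape patterns
  have hB := B_shape patterns
  apply List.ext_getElem (by rw [hA.1, hB.1])
  intro r h1 h2
  have hr : r < patterns.length := hA.1 ▸ h1
  apply List.ext_getElem
    (by rw [hA.2 _ (List.getElem_mem _), hB.2 _ (List.getElem_mem _)])
  intro c hc1 hc2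
  rw [hA.2 _ (List.getElem_mem _)] at hc1
  have hc : c < patterns.length := hc1
  have eA : (build_compatibility_matrix patterns)[r][c]
      = get2 (build_compatibility_matrix patterns) r c := by
    unfold get2
    rw [List.getD_eq_getElem _ _ h1, List.getD_eq_getElem _ _ (by
      rw [hA.2 _ (List.getElem_mem _)]; exact hc)]
  have eB : (build_compatibility_matrix_alt patterns)[r][c]
      = PySem.Set.isdisjoint (runs_of (patterns.getD r "")) (runs_of (patterns.getD c "")) := by
    rw [← B_entry patterns r c hr hc]
    rw [List.getD_eq_getElem _ _ h2, List.getD_eq_getElem _ _ (by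
      rw [hB.2 _ (List.getElem_mem _)]; exact hc)]
  rw [eA, eB, A_entry patterns r c hr hc]
  unfold vfun
  rcases Nat.le_total r c with hle | hle
  · rw [Nat.min_eq_left hle, Nat.max_eq_right hle]
    exact compat_eq_disjoint _ _ (hpre r hr c hc hle)
  · rw [Nat.min_eq_right hle, Nat.max_eq_left hle]
    rw [compat_eq_disjoint _ _ (hpre c hc r hr hle)]
    exact isdisjoint_comm _ _
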